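-- pv_equiv track=rewrite | github.com/pypi-data/pypi-mirror-375 | packages/squatspotter/squatspotter-1.0.0.tar.gz/squatspotter-1.0.0/squatspotter/listMaker.py | _homoglyphes
-- ===== SOURCE A (Python) =====
-- HOMOGLYPHES = {
--     'o': ['0'], 'l': ['1', 'i', 'I'], 'i': ['1', 'l'], 'g': ['q', '9'], 'e': ['3'],
--     'a': ['@'], 'b': ['6', '8'], 's': ['5', '$'], 'vv': ['w'], 'rn': ['m'],
--     'cl': ['d'], 'nn': ['m']
-- }
--
-- def _homoglyphes(mot):
--     """Remplace des caractères/groupes par des caractères visuellement similaires."""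
--     variations = set()
--     # Remplacement de caractères uniques
--     for i, c in enumerate(mot):
--         if c in HOMOGLYPHES:
--             for g in HOMOGLYPHES[c]:
--                 variations.add(mot[:i] + g + mot[i+1:])
--     # Remplacement de groupes (ex: 'rn' -> 'm')
--     for group, replacements in HOMOGLYPHES.items():
--         if len(group) > 1 and group in mot:
--             for rep in replacements:
--                 variations.add(mot.replace(group, rep))
--     return variations
-- ===== SOURCE B (Python) =====
-- HOMOGLYPHES = {
--     'o': ['0'], 'l': ['1', 'i', 'I'], 'i': ['1', 'l'], 'g': ['q', '9'], 'e': ['3'],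
--     'a': ['@'], 'b': ['6', '8'], 's': ['5', '$'], 'vv': ['w'], 'rn': ['m'],
--     'cl': ['d'], 'nn': ['m']
-- }
--
-- def _homoglyphes(mot):
--     """Same variations, built as one flat list (prefix/rest walk + one group
--     comprehension) deduplicated once at the end, instead of incremental set.add
--     with index slicing."""
--     out = []
--     prefix, rest = '', mot
--     while rest:
--         c, rest = rest[0], rest[1:]
--         out.extend(prefix + g + rest for g in HOMOGLYPHES.get(c, []))
--         prefix += c
--     out.extend(mot.replace(k, r)
--                for k, reps in HOMOGLYPHES.items()
--                if len(k) > 1 and k in mot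
--                for r in reps)
--     return set(out)
-- ===== Notes on version B (the rewrite author's own statement) =====
-- stated objective: alternative
-- what changed: B builds one flat list of candidates by walking the word with a prefix/rest accumulator (no indices or double slicing) plus a single flat comprehension for the multi-char groups, and deduplicates once at the end, instead of A's enumerate-with-two-slices loops mutating a set element by element.
import Mathlib
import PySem

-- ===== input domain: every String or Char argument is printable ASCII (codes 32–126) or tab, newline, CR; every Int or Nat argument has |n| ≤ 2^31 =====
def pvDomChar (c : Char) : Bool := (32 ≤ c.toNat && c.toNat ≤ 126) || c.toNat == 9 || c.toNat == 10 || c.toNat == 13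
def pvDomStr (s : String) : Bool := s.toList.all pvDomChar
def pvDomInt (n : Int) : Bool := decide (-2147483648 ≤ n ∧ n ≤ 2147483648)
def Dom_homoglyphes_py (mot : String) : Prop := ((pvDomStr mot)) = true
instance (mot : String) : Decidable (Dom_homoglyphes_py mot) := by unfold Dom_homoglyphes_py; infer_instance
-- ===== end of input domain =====

-- B builds one flat candidate list (prefix/rest walk + one flat group comprehension) deduplicated once,
-- instead of A's enumerate-with-slices loops mutating a set element by element; same result, same cost.

-- ===== PORT A =====
-- the module constant HOMOGLYPHES, as a dict in insertion order (strings as char lists)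
def pvHomo : PySem.Dict (List Char) (List (List Char)) :=
  PySem.Dict.mk [ (['o'], [['0']]), (['l'], [['1'], ['i'], ['I']]), (['i'], [['1'], ['l']]),
    (['g'], [['q'], ['9']]), (['e'], [['3']]), (['a'], [['@']]),
    (['b'], [['6'], ['8']]), (['s'], [['5'], ['$']]), (['v','v'], [['w']]),
    (['r','n'], [['m']]), (['c','l'], [['d']]), (['n','n'], [['m']]) ]

def homoglyphes_py (mot : String) : List String :=
  let cs := mot.toList
  -- for i, c in enumerate(mot): if c in HOMOGLYPHES: for g in ...: variations.add(mot[:i]+g+mot[i+1:])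
  let v1 := (PySem.List.enumerate cs 0).foldl (fun (v : PySem.Set (List Char)) ic =>
      match pvHomo.get? [ic.2] with
      | some gs => gs.foldl (fun v g =>
          PySem.Set.add v
            (PySem.List.slice cs none (some ic.1) ++ g ++ PySem.List.slice cs (some (ic.1 + 1)) none)) v
      | none => v) PySem.Set.empty
  -- for group, replacements in HOMOGLYPHES.items(): if len(group) > 1 and group in mot: ...
  let v2 := (PySem.Dict.items pvHomo).foldl (fun (v : PySem.Set (List Char)) kv =>
      if kv.1.length > 1 && PySem.Chars.isIn kv.1 cs then
        kv.2.foldl (fun v rep => PySem.Set.add v (PySem.Chars.replace cs kv.1 rep)) v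
      else v) v1
  v2.map String.ofList

-- ===== PORT B =====
-- while rest: c, rest = rest[0], rest[1:]; out += [prefix + g + rest for g in HOMOGLYPHES.get(c, [])]; prefix += c
def pvAltSingles (pre : List Char) : List Char → List (List Char)
  | [] => []
  | c :: rest => (pvHomo.getD [c] []).map (fun g => pre ++ g ++ rest) ++ pvAltSingles (pre ++ [c]) rest

def homoglyphes_py_alt (mot : String) : List String :=
  let cs := mot.toList
  let singles := pvAltSingles [] cs
  let groups := (PySem.Dict.items pvHomo).flatMap (fun kv =>
      if kv.1.length > 1 && PySem.Chars.isIn kv.1 cs then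
        kv.2.map (fun r => PySem.Chars.replace cs kv.1 r)
      else [])
  (PySem.Set.ofList (singles ++ groups)).map String.ofList

-- ===== PRECONDITION & SPEC =====
def Spec_homoglyphes_py (mot : String) (out : List String) : Prop := out = homoglyphes_py_alt mot
instance (mot : String) (out : List String) : Decidable (Spec_homoglyphes_py mot out) := by unfold Spec_homoglyphes_py; infer_instance

-- ===== CLAIM (what is proved, stated in full; the proofs are below) =====
def Claim_equal_homoglyphes_py : Prop := ∀ (mot : String), Dom_homoglyphes_py mot → Spec_homoglyphes_py mot (homoglyphes_py mot)

-- ===== LEMMAS AND PROOFS =====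

-- Nat-indexed enumerate used as the common normal form of the single-char pass
def pvEnum (s : Nat) : List Char → List (Nat × Char)
  | [] => []
  | c :: l => (s, c) :: pvEnum (s + 1) l

lemma pvEnum_shift (l : List Char) (s : Nat) :
    pvEnum (s + 1) l = (pvEnum s l).map (fun p => (p.1 + 1, p.2)) := by
  induction l generalizing s with
  | nil => rfl
  | cons c l ih => simp [pvEnum, ih]

lemma enumerate_eq_pvEnum (l : List Char) (s : Nat) :
    PySem.List.enumerate l (s : Int) = (pvEnum s l).map (fun p => ((p.1 : Int), p.2)) := by
  induction l generalizing s with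
  | nil => simp [PySem.List.enumerate_nil, pvEnum]
  | cons c l ih =>
      have := ih (s + 1)
      push_cast at this
      simp [PySem.List.enumerate_cons, pvEnum, this]

lemma update_append {β : Type} [BEq β] (s : PySem.Set β) (xs ys : List β) :
    PySem.Set.update s (xs ++ ys) = PySem.Set.update (PySem.Set.update s xs) ys := by
  simp [PySem.Set.update, List.foldl_append]

-- A's first loop flattened: fold of match/inner-fold = update with a flatMap
lemma foldA_singles (l : List (Int × Char)) (s : PySem.Set (List Char))
    (mk : Int → List Char → List Char) :
    l.foldl (fun v ic =>
      match pvHomo.get? [ic.2] with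
      | some gs => gs.foldl (fun v g => PySem.Set.add v (mk ic.1 g)) v
      | none => v) s
    = PySem.Set.update s (l.flatMap (fun ic => (pvHomo.getD [ic.2] []).map (mk ic.1))) := by
  induction l generalizing s with
  | nil => rfl
  | cons ic l ih =>
      simp only [List.foldl_cons, List.flatMap_cons, update_append]
      rw [ih]
      rcases h : pvHomo.get? [ic.2] with _ | gs <;>
        simp [PySem.Dict.getD, h, ← PySem.Set.update_map_eq_foldl_add, PySem.Set.update]

-- A's second loop flattened likewise
lemma foldA_groups (cs : List Char) (l : List (List Char × List (List Char)))
    (s : PySem.Set (List Char)) :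
    l.foldl (fun v kv =>
      if kv.1.length > 1 && PySem.Chars.isIn kv.1 cs then
        kv.2.foldl (fun v rep => PySem.Set.add v (PySem.Chars.replace cs kv.1 rep)) v
      else v) s
    = PySem.Set.update s (l.flatMap (fun kv =>
        if kv.1.length > 1 && PySem.Chars.isIn kv.1 cs then
          kv.2.map (fun r => PySem.Chars.replace cs kv.1 r)
        else [])) := by
  induction l generalizing s with
  | nil => rfl
  | cons kv l ih =>
      simp only [List.foldl_cons, List.flatMap_cons, update_append]
      rw [ih]
      by_cases h : (kv.1.length > 1 && PySem.Chars.isIn kv.1 cs) = true <;>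
        simp [h, ← PySem.Set.update_map_eq_foldl_add, PySem.Set.update]

-- B's prefix/rest walk equals the Nat-enumerate normal form
lemma pvAltSingles_eq (l : List Char) (pre : List Char) :
    pvAltSingles pre l
      = (pvEnum 0 l).flatMap (fun ic =>
          (pvHomo.getD [ic.2] []).map (fun g => pre ++ (l.take ic.1 ++ g ++ l.drop (ic.1 + 1)))) := by
  induction l generalizing pre with
  | nil => rfl
  | cons c l ih =>
      simp only [pvAltSingles, pvEnum, List.flatMap_cons, pvEnum_shift, List.flatMap_map]
      congr 1
      · simp
      · rw [ih (pre ++ [c])]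
        apply List.flatMap_congr  -- may not exist; fallback below
        intro ic _
        congr 1
        funext g
        simp [List.take_succ_cons, List.drop_succ_cons]

-- the single-char candidate lists of the two ports coincide
lemma singles_eq (cs : List Char) :
    (PySem.List.enumerate cs 0).flatMap (fun ic =>
        (pvHomo.getD [ic.2] []).map (fun g =>
          PySem.List.slice cs none (some ic.1) ++ g ++ PySem.List.slice cs (some (ic.1 + 1)) none))
      = pvAltSingles [] cs := by
  rw [pvAltSingles_eq]
  have h0 : (0 : Int) = ((0 : Nat) : Int) := rfl
  rw [h0, enumerate_eq_pvEnum, List.flatMap_map]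
  apply List.flatMap_congr
  intro ic _
  congr 1
  funext g
  have h1 : ((ic.1 : Int) + 1) = ((ic.1 + 1 : Nat) : Int) := by push_cast; ring
  rw [PySem.List.slice_to_natCast, h1, PySem.List.slice_from_natCast]
  simp

-- ===== VERDICT (by name: the statement is the Claim_ definition above) =====
theorem homoglyphes_py_spec : Claim_equal_homoglyphes_py := by
  intro mot _
  unfold Spec_homoglyphes_py
  simp only [homoglyphes_py, homoglyphes_py_alt]
  rw [foldA_singles (PySem.List.enumerate mot.toList 0) PySem.Set.empty
        (fun i g => PySem.List.slice mot.toList none (some i) ++ g ++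
          PySem.List.slice mot.toList (some (i + 1)) none),
      foldA_groups mot.toList, singles_eq mot.toList]
  congr 1
  rw [PySem.Set.ofList_eq_foldl, List.foldl_append]
  rfl
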